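-- pv_equiv track=rewrite | github.com/jneug/schule-projekte | Python/Automaten/nka_anbn.py | scan_word
-- ===== SOURCE A (Python) =====
-- def scan_word( state, word, stack ):
--     stack_char = stack.pop(0) if stack else ""
--
--     if not word:
--         return state == 1 and stack_char == "#"
--
--     char = word[0]
--     word = word[1:]
--
--     if state == 0:
--         if stack_char == '#':
--             if char == 'a':
--                 return scan_word(0, word, ['A','#'] + stack)
--         elif stack_char == 'A':
--             if char == 'a':
--                 return scan_word(0, word, ['A','A'] + stack)
--             elif char == 'b':
--                 return scan_word(1, word, stack)
--     elif state == 1: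
--         if stack_char == 'A':
--             if char == 'b':
--                 return scan_word(1, word, stack)
--
--     # Endzustand erreicht und ggf. test, ob Keller leer,
--     # falls von der Sprache gefordert.
--     return False
-- ===== SOURCE B (Python) =====
-- # Closed-form recognizer: instead of simulating the PDA step by step, classify the
-- # input directly (count leading a's, check the rest is b's, compare counts against
-- # the stack prefix). Return-value equivalent to A; does not mutate `stack` (A pops it).
--
-- def _aux(m, stack):
--     # acceptance from state 1 with m letters 'b' left: m A's then '#' on the stack
--     return stack[:m] == ['A'] * m and len(stack) > m and stack[m] == '#'
--
-- def _lead_a(word):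
--     i = 0
--     while i < len(word) and word[i] == 'a':
--         i += 1
--     return i
--
-- def _scan0(word, stack):
--     if not word:
--         return False
--     i = _lead_a(word)
--     if any(c != 'b' for c in word[i:]):
--         return False
--     m = len(word) - i
--     if stack and stack[0] == '#':
--         return i >= 1 and m == i
--     return m >= i and _aux(m - i, stack)
--
-- def scan_word(state, word, stack):
--     if state == 1:
--         return all(c == 'b' for c in word) and _aux(len(word), stack)
--     if state != 0:
--         return False
--     return _scan0(word, stack)
-- ===== Notes on version B (the rewrite author's own statement) =====
-- stated objective: alternative
-- what changed: Replaces A's recursive step-by-step PDA simulation (which rebuilds the stack with list concatenation on every push) by a direct closed-form classification: count the leading a's, check the remainder is all b's, and compare the two counts against the stack's prefix of 'A's and the following '#'.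
import Mathlib
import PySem

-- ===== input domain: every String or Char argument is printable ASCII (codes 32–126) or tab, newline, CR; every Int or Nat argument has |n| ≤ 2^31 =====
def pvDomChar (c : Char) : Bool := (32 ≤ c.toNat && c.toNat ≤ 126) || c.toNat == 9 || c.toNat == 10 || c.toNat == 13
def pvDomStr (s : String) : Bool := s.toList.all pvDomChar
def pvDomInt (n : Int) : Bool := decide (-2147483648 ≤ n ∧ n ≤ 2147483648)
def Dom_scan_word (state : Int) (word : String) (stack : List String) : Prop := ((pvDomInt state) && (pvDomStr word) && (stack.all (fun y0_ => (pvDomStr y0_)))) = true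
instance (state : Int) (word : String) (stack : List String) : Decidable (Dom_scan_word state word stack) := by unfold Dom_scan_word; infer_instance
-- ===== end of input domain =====

-- B replaces A's recursive PDA simulation by a closed-form classification of the word
-- against the stack (objective: alternative). Equivalence is about the RETURN value only:
-- A pops elements off the caller's `stack` in place, B does not mutate its arguments.

-- ===== PORT A =====
-- literal port of A's recursion; the word is modelled as List Char, `word[1:]` is the tail
def scanA (state : Int) (word : List Char) (stack : List String) : Bool :=
  let stack_char : String := match stack with | [] => "" | s :: _ => s
  let rest : List String := match stack with | [] => [] | _ :: t => t
  match word with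
  | [] => decide (state = 1 ∧ stack_char = "#")
  | char :: w =>
    if state = 0 then
      if stack_char = "#" then
        if char = 'a' then scanA 0 w ("A" :: "#" :: rest) else false
      else if stack_char = "A" then
        if char = 'a' then scanA 0 w ("A" :: "A" :: rest)
        else if char = 'b' then scanA 1 w rest
        else false
      else false
    else if state = 1 then
      if stack_char = "A" then
        if char = 'b' then scanA 1 w rest else false
      else false
    else false

def scan_word (state : Int) (word : String) (stack : List String) : Bool :=
  scanA state word.toList stack

-- ===== PORT B =====
-- port of Source B's _aux: Python's short-circuit `and` chain as one decidable conjunction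
def auxAcc (m : Nat) (stack : List String) : Bool :=
  decide (stack.take m = List.replicate m "A" ∧ m < stack.length ∧ stack.getD m "" = "#")

-- port of Source B's _lead_a counting loop
def countLeadA : List Char → Nat
  | [] => 0
  | c :: r => if c = 'a' then countLeadA r + 1 else 0

-- port of Source B's _scan0; `stack and stack[0] == '#'` is `stack.headD "" = "#"` ("" ≠ "#")
def scan0 (w : List Char) (stack : List String) : Bool :=
  if w = [] then false
  else
    let i := countLeadA w
    if (w.drop i).any (fun c => c != 'b') then false
    else
      let m := w.length - i
      if stack.headD "" = "#" then decide (1 ≤ i) && decide (m = i)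
      else decide (i ≤ m) && auxAcc (m - i) stack

def scan_word_alt (state : Int) (word : String) (stack : List String) : Bool :=
  if state = 1 then word.toList.all (fun c => c == 'b') && auxAcc word.toList.length stack
  else if state ≠ 0 then false
  else scan0 word.toList stack

-- ===== PRECONDITION & SPEC =====
def Spec_scan_word (state : Int) (word : String) (stack : List String) (out : Bool) : Prop := out = scan_word_alt state word stack
instance (state : Int) (word : String) (stack : List String) (out : Bool) : Decidable (Spec_scan_word state word stack out) := by unfold Spec_scan_word; infer_instance

-- ===== CLAIM (what is proved, stated in full; the proofs are below) =====
def Claim_equal_scan_word : Prop := ∀ (state : Int) (word : String) (stack : List String), Dom_scan_word state word stack → Spec_scan_word state word stack (scan_word state word stack)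

-- ===== LEMMAS AND PROOFS =====

lemma auxAcc_nil (k : Nat) : auxAcc k [] = false := by
  simp [auxAcc]

lemma auxAcc_zero_cons (s : String) (t : List String) : auxAcc 0 (s :: t) = decide (s = "#") := by
  simp [auxAcc]

lemma auxAcc_succ_cons (k : Nat) (s : String) (t : List String) :
    auxAcc (k + 1) (s :: t) = (decide (s = "A") && auxAcc k t) := by
  by_cases hs : s = "A"
  · subst hs; simp [auxAcc, List.replicate_succ]
  · simp [auxAcc, List.replicate_succ, hs]

lemma auxAcc_cons_A (k : Nat) (xs : List String) : auxAcc (k + 1) ("A" :: xs) = auxAcc k xs := by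
  simp [auxAcc_succ_cons]

lemma auxAcc_A_sharp (k : Nat) (t : List String) :
    auxAcc k ("A" :: "#" :: t) = decide (k = 1) := by
  match k with
  | 0 => simp [auxAcc_zero_cons]
  | 1 => simp [auxAcc_cons_A, auxAcc_zero_cons]
  | (j+2) => simp [auxAcc_succ_cons]

lemma countLeadA_le (w : List Char) : countLeadA w ≤ w.length := by
  induction w with
  | nil => simp [countLeadA]
  | cons c r ih => by_cases hc : c = 'a' <;> simp [countLeadA, hc] <;> omega

lemma scanA_one (w : List Char) (stack : List String) :
    scanA 1 w stack = (w.all (fun c => c == 'b') && auxAcc w.length stack) := by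
  induction w generalizing stack with
  | nil =>
    cases stack with
    | nil => simp [scanA, auxAcc]
    | cons s t => simp [scanA, auxAcc]
  | cons c r ih =>
    cases stack with
    | nil => simp [scanA, auxAcc, List.replicate_succ]
    | cons s t =>
      by_cases hs : s = "A"
      · subst hs
        by_cases hc : c = 'b'
        · subst hc; simp [scanA, ih, auxAcc_cons_A]
        · simp [scanA, hc]
      · simp [scanA, hs, auxAcc_succ_cons]

-- normal form shared by scan0 and the state-0 behaviour of scanA
def N (i m : Nat) (ok : Bool) (stack : List String) : Bool :=
  match ok with
  | false => false
  | true =>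
    if stack.headD "" = "#" then decide (1 ≤ i) && decide (m = i)
    else decide (i ≤ m) && auxAcc (m - i) stack

lemma N_nil (i m : Nat) (ok : Bool) : N i m ok [] = false := by
  cases ok <;> simp [N, auxAcc_nil]

lemma N_other (i m : Nat) (ok : Bool) (s : String) (t : List String)
    (hsh : s ≠ "#") (hsA : s ≠ "A") : N i m ok (s :: t) = false := by
  cases ok with
  | false => simp [N]
  | true =>
    simp [N, hsh]
    intro _
    match h : m - i with
    | 0 => simp [auxAcc_zero_cons, hsh]
    | (k+1) => simp [auxAcc_succ_cons, hsA]

lemma scan0_eq_N (w : List Char) (stack : List String) :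
    scan0 w stack =
      N (countLeadA w) (w.length - countLeadA w)
        (decide (w ≠ []) && !((w.drop (countLeadA w)).any (fun c => c != 'b'))) stack := by
  by_cases hw : w = []
  · subst hw; simp [scan0, N]
  · by_cases hany : ((w.drop (countLeadA w)).any (fun c => c != 'b')) = true
    · simp [scan0, hw, hany, N]
    · simp only [scan0, if_neg hw, hany, Bool.not_false, decide_eq_true hw]
      simp [N]

lemma scanA0_eq_N (w : List Char) (stack : List String) :
    scanA 0 w stack =
      N (countLeadA w) (w.length - countLeadA w)
        (decide (w ≠ []) && !((w.drop (countLeadA w)).any (fun c => c != 'b'))) stack := by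
  induction w generalizing stack with
  | nil =>
    cases stack <;> simp [scanA, countLeadA, N]
  | cons c r ih =>
    have hle := countLeadA_le r
    by_cases hc : c = 'a'
    · subst hc
      have hcl : countLeadA ('a' :: r) = countLeadA r + 1 := by simp [countLeadA]
      have hdr : ('a' :: r).drop (countLeadA r + 1) = r.drop (countLeadA r) := by
        simp [List.drop_succ_cons]
      have hm : ('a' :: r).length - (countLeadA r + 1) = r.length - countLeadA r := by
        simp [Nat.succ_sub_succ]
      rw [hcl, hdr, hm]
      set i' := countLeadA r with hi'
      set m' := r.length - countLeadA r with hm'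
      set any' := ((r.drop (countLeadA r)).any (fun c => c != 'b')) with hany'
      have hok : (decide (('a' :: r) ≠ []) && !any') = !any' := by simp
      rw [hok]
      clear_value i' m' any'
      cases stack with
      | nil => rw [N_nil]; simp [scanA]
      | cons s t =>
        by_cases hsh : s = "#"
        · subst hsh
          have hL : scanA 0 ('a' :: r) ("#" :: t) = scanA 0 r ("A" :: "#" :: t) := by
            simp [scanA]
          rw [hL, ih]
          by_cases hr : r = []
          · subst hr
            simp only [hi', hm', countLeadA, List.length_nil, List.drop_nil, List.any_nil] at *
            simp [N]
            cases any' <;> rfl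
          · rw [(by simp [hr] : (decide (r ≠ []) && !any') = !any')]
            cases hA : any' with
            | true => simp [N]
            | false =>
              simp only [N, Bool.not_false, List.headD_cons]
              rw [if_neg (by decide : ¬ ("A" : String) = "#"), if_pos trivial,
                  auxAcc_A_sharp, Bool.eq_iff_iff]
              simp only [Bool.and_eq_true, decide_eq_true_eq]
              omega
        · by_cases hsA : s = "A"
          · subst hsA
            have hL : scanA 0 ('a' :: r) ("A" :: t) = scanA 0 r ("A" :: "A" :: t) := by
              simp [scanA]
            rw [hL, ih]
            by_cases hr : r = []
            · subst hr
              simp only [hi', hm', countLeadA, List.length_nil, List.drop_nil, List.any_nil] at *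
              simp [N]
              cases any' <;> rfl
            · rw [(by simp [hr] : (decide (r ≠ []) && !any') = !any')]
              cases hA : any' with
              | true => simp [N]
              | false =>
                simp only [N, Bool.not_false, List.headD_cons]
                match h : m' - i' with
                | 0 =>
                  rw [auxAcc_zero_cons]
                  have h1 : ¬ (i' + 1 ≤ m') := by omega
                  simp [h1]
                | (k+1) =>
                  rw [auxAcc_cons_A]
                  have h2 : m' - (i' + 1) = k := by omega
                  rw [h2]
                  have h3 : i' ≤ m' := by omega
                  have h4 : i' + 1 ≤ m' := by omega
                  simp [h3, h4]
          · have hL : scanA 0 ('a' :: r) (s :: t) = false := by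
              simp [scanA, hsh, hsA]
            rw [hL, N_other _ _ _ _ _ hsh hsA]
    · have hcl : countLeadA (c :: r) = 0 := by simp [countLeadA, hc]
      rw [hcl]
      simp only [List.drop_zero, List.length_cons, Nat.sub_zero]
      by_cases hb : c = 'b'
      · subst hb
        have hany : ((('b' :: r)).any (fun c => c != 'b')) = ((r).any (fun c => c != 'b')) := by
          simp
        rw [hany]
        set any' := ((r).any (fun c => c != 'b')) with hany'
        have hok : (decide (('b' :: r) ≠ []) && !any') = !any' := by simp
        rw [hok]
        cases stack with
        | nil => rw [N_nil]; simp [scanA]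
        | cons s t =>
          by_cases hsh : s = "#"
          · subst hsh
            have hL : scanA 0 ('b' :: r) ("#" :: t) = false := by simp [scanA]
            rw [hL]
            cases any'
            · simp [N]
            · simp only [N, List.headD_cons]
              simp
          · by_cases hsA : s = "A"
            · subst hsA
              have hL : scanA 0 ('b' :: r) ("A" :: t) = scanA 1 r t := by simp [scanA]
              rw [hL, scanA_one]
              have hall : (r.all (fun c => c == 'b')) = !any' := by
                rw [hany', Bool.eq_iff_iff]
                simp [List.all_eq_true]
              rw [hall]
              cases any' with
              | true => simp [N]
              | false =>
                simp [N, auxAcc_cons_A]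
            · have hL : scanA 0 ('b' :: r) (s :: t) = false := by
                simp [scanA, hsh, hsA]
              rw [hL, N_other _ _ _ _ _ hsh hsA]
      · have hany : ((c :: r).any (fun c => c != 'b')) = true := by
          simp [List.any_eq_true]; exact Or.inl hb
        rw [hany]
        have hL : scanA 0 (c :: r) stack = false := by
          cases stack with
          | nil => simp [scanA, hc, hb]
          | cons s t =>
            simp [scanA, hc, hb]
        rw [hL]
        simp [N]

lemma scanA_zero (w : List Char) (stack : List String) : scanA 0 w stack = scan0 w stack := by
  rw [scanA0_eq_N, scan0_eq_N]

-- ===== VERDICT (by name: the statement is the Claim_ definition above) =====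
theorem scan_word_spec : Claim_equal_scan_word := by
  intro state word stack _
  unfold Spec_scan_word scan_word scan_word_alt
  by_cases h1 : state = 1
  · subst h1; rw [if_pos rfl, scanA_one]
  · rw [if_neg h1]
    by_cases h0 : state = 0
    · subst h0; rw [if_neg (by decide), scanA_zero]
    · rw [if_pos h0]
      cases word.toList with
      | nil => simp [scanA, h1]
      | cons c w => simp [scanA, h0, h1]
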